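-- pv_equiv track=rewrite | github.com/Geniucker/Chem-to-LaTex | chem.py | chem
-- ===== SOURCE A (Python) =====
-- def chem(inp: str) -> str:
--     temp = 5*[""]
--     i, j = 0, 0
--     num = ""
--     mark = False
--     for i in range(len(inp)):
--         # deal with the numbers
--         if inp[i].isdigit():
--             num += inp[i]
--         else:
--             # the numbers after an English alphabet should be a subscript
--             if mark and 0 != len(num):
--                 # add "{}" to long numbers
--                 if len(num) > 1:
--                     temp[j] += "_{" + num + "}"
--                 else:
--                     temp[j] += "_" + num
--             else:
--                 temp[j] += num
--             num = ""
--
--             # mark the English alphabet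
--             mark = inp[i].isalpha() or (inp[i] in ")]")
--             # deal with the "="
--             if "=" == inp[i]:
--                 j += 1
--                 if j > 3:
--                     break
--                 continue
--             temp[j] += inp[i]
--     # deal with the last part
--     if mark and 0 != len(num):
--         if len(num) > 1:
--             temp[j] += "_{" + num + "}"
--         else:
--             temp[j] += "_"+num
--     else:
--         temp[j] += num
--     # output
--     if 0 == j:
--         return temp[0]
--     elif 1 == j:
--         return temp[0] + "=" + temp[1]
--     elif 2 == j:
--         return temp[0] + "\\frac{\\underline{" + temp[1] + "}}{\\ }" + temp[2]
--     elif 3 == j: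
--         return temp[0] + "\\frac{\\underline{" + temp[1] + "}}{" + temp[2] + "}"\
--                        + temp[3]
--     else:
--         return "Error! There seems more then 3\"=\" !"
-- ===== SOURCE B (Python) =====
-- def _fmt(seg: str) -> str:
--     out = ""
--     num = ""
--     mark = False
--     for c in seg:
--         if c.isdigit():
--             num += c
--         else:
--             if mark and num:
--                 out += "_{" + num + "}" if len(num) > 1 else "_" + num
--             else:
--                 out += num
--             num = ""
--             out += c
--             mark = c.isalpha() or c in ")]"
--     if mark and num:
--         out += "_{" + num + "}" if len(num) > 1 else "_" + num
--     else:
--         out += num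
--     return out
--
--
-- def chem(inp: str) -> str:
--     parts = inp.split("=")
--     if len(parts) >= 5:
--         return "Error! There seems more then 3\"=\" !"
--     segs = [_fmt(p) for p in parts]
--     if len(segs) == 1:
--         return segs[0]
--     if len(segs) == 2:
--         return segs[0] + "=" + segs[1]
--     if len(segs) == 3:
--         return segs[0] + "\\frac{\\underline{" + segs[1] + "}}{\\ }" + segs[2]
--     return segs[0] + "\\frac{\\underline{" + segs[1] + "}}{" + segs[2] + "}" + segs[3]
-- ===== Notes on version B (the rewrite author's own statement) =====
-- stated objective: simpler
-- what changed: A's single stateful scan over the whole input (a fixed 5-slot table, a running counter of separators and a mid-loop break, with repeated quadratic string concatenation onto a table slot) is replaced by splitting the input on the separator and formatting each segment independently with a small subscript formatter, then assembling by the number of parts.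
import Mathlib
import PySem

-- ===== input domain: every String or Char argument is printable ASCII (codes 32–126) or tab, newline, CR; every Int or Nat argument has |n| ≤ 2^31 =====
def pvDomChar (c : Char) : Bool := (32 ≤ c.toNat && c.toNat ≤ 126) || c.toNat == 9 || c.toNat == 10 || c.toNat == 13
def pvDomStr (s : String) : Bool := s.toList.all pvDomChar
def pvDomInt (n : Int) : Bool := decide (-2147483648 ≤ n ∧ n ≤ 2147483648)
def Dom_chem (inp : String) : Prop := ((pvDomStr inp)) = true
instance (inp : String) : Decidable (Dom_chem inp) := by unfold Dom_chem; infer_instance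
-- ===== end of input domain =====

-- B replaces A's single stateful scan (5-slot table, running '=' counter, mid-loop break)
-- by split-on-'=' followed by an independent per-segment formatter; objective: simpler decomposition.

-- ===== PORT A =====
-- A's flush of the pending digit buffer: `if mark and 0 != len(num): ... else: temp[j] += num`
def pvFlush (mark : Bool) (num : List Char) : List Char :=
  if mark = true ∧ num.length ≠ 0 then
    if num.length > 1 then '_' :: '{' :: (num ++ ['}'])
    else '_' :: num
  else num

-- A's for-loop over the characters; state (temp, j, num, mark); returns the state at loop exit (including the `break` when j > 3)
def chemLoop : List Char → List (List Char) → Nat → List Char → Bool →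
    List (List Char) × Nat × List Char × Bool
  | [], temp, j, num, mark => (temp, j, num, mark)
  | c :: rest, temp, j, num, mark =>
    if PySem.Chars.isdigit c then
      chemLoop rest temp j (num ++ [c]) mark
    else
      let temp1 := temp.set j (temp.getD j [] ++ pvFlush mark num)
      let mark1 := PySem.Chars.isalpha c || c = ')' || c = ']'
      if c = '=' then
        if j + 1 > 3 then (temp1, j + 1, [], mark1)       -- break
        else chemLoop rest temp1 (j + 1) [] mark1          -- continue
      else chemLoop rest (temp1.set j (temp1.getD j [] ++ [c])) j [] mark1

def chem (inp : String) : String :=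
  match chemLoop inp.toList (List.replicate 5 []) 0 [] false with
  | (temp, j, num, mark) =>
    let temp := temp.set j (temp.getD j [] ++ pvFlush mark num)   -- deal with the last part
    if j = 0 then String.mk (temp.getD 0 [])
    else if j = 1 then String.mk (temp.getD 0 [] ++ '=' :: temp.getD 1 [])
    else if j = 2 then
      String.mk (temp.getD 0 [] ++ "\\frac{\\underline{".toList ++ temp.getD 1 []
        ++ "}}{\\ }".toList ++ temp.getD 2 [])
    else if j = 3 then
      String.mk (temp.getD 0 [] ++ "\\frac{\\underline{".toList ++ temp.getD 1 []
        ++ "}}{".toList ++ temp.getD 2 [] ++ "}".toList ++ temp.getD 3 [])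
    else "Error! There seems more then 3\"=\" !"

-- ===== PORT B =====
-- hand port of Python's str.split("=") (single-character separator; empty pieces kept): exact
def pvSplitEq : List Char → List (List Char)
  | [] => [[]]
  | c :: rest =>
    if c = '=' then [] :: pvSplitEq rest
    else
      match pvSplitEq rest with
      | s :: ss => (c :: s) :: ss
      | [] => [[c]]       -- unreachable: pvSplitEq never returns []

-- _fmt's loop: accumulators (out, num, mark); the flush conditional is the same expression as A's (pvFlush)
def fmtLoop : List Char → List Char → List Char → Bool → List Char
  | [], out, num, mark => out ++ pvFlush mark num
  | c :: rest, out, num, mark =>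
    if PySem.Chars.isdigit c then fmtLoop rest out (num ++ [c]) mark
    else fmtLoop rest (out ++ pvFlush mark num ++ [c]) []
           (PySem.Chars.isalpha c || c = ')' || c = ']')

def pvFmt (seg : List Char) : List Char := fmtLoop seg [] [] false

def chem_alt (inp : String) : String :=
  let parts := pvSplitEq inp.toList
  if parts.length ≥ 5 then "Error! There seems more then 3\"=\" !"
  else
    let segs := parts.map pvFmt
    if segs.length = 1 then String.mk (segs.getD 0 [])
    else if segs.length = 2 then String.mk (segs.getD 0 [] ++ '=' :: segs.getD 1 [])
    else if segs.length = 3 then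
      String.mk (segs.getD 0 [] ++ "\\frac{\\underline{".toList ++ segs.getD 1 []
        ++ "}}{\\ }".toList ++ segs.getD 2 [])
    else
      String.mk (segs.getD 0 [] ++ "\\frac{\\underline{".toList ++ segs.getD 1 []
        ++ "}}{".toList ++ segs.getD 2 [] ++ "}".toList ++ segs.getD 3 [])

-- ===== PRECONDITION & SPEC =====
def Spec_chem (inp : String) (out : String) : Prop := out = chem_alt inp
instance (inp : String) (out : String) : Decidable (Spec_chem inp out) := by unfold Spec_chem; infer_instance

-- ===== CLAIM (what is proved, stated in full; the proofs are below) =====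
def Claim_equal_chem : Prop := ∀ (inp : String), Dom_chem inp → Spec_chem inp (chem inp)

-- ===== LEMMAS AND PROOFS =====

theorem pvSplitEq_ne_nil (cs : List Char) : pvSplitEq cs ≠ [] := by
  induction cs with
  | nil => simp [pvSplitEq]
  | cons c rest ih =>
    simp only [pvSplitEq]
    split
    · simp
    · rcases h : pvSplitEq rest with _ | ⟨s, ss⟩
      · exact absurd h ih
      · simp

-- finishing A's computation: run the loop, then the trailing flush
def runA (cs : List Char) (temp : List (List Char)) (j : Nat) (num : List Char) (mark : Bool) :
    List (List Char) × Nat :=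
  match chemLoop cs temp j num mark with
  | (t, j', n', m') => (t.set j' (t.getD j' [] ++ pvFlush m' n'), j')

-- placing the formatted segments into the slot table, with A's break at j > 3
def place : List (List Char) → Nat → List (List Char) → List (List Char) × Nat
  | temp, j, [] => (temp, j)
  | temp, j, [s] => (temp.set j (temp.getD j [] ++ s), j)
  | temp, j, s :: s' :: rest =>
    let t := temp.set j (temp.getD j [] ++ s)
    if j + 1 > 3 then (t.set (j + 1) (t.getD (j + 1) []), j + 1)
    else place t (j + 1) (s' :: rest)

theorem getD_set_self' (l : List (List Char)) (n : Nat) (a : List Char) (h : n < l.length) :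
    (l.set n a)[n]?.getD [] = a := by
  simp [List.getElem?_set_self h]

theorem fmtLoop_out (cs : List Char) : ∀ (out num : List Char) (mark : Bool),
    fmtLoop cs out num mark = out ++ fmtLoop cs [] num mark := by
  induction cs with
  | nil => intro out num mark; simp [fmtLoop]
  | cons c rest ih =>
    intro out num mark
    simp only [fmtLoop]
    split
    · exact ih out (num ++ [c]) mark
    · rw [ih (out ++ pvFlush mark num ++ [c]), ih ([] ++ pvFlush mark num ++ [c])]
      simp

theorem place_absorb (S : List (List Char)) (temp : List (List Char)) (j : Nat)
    (x g : List Char) (h : j < temp.length) :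
    place temp j ((x ++ g) :: S) =
      place (temp.set j (temp.getD j [] ++ x)) j (g :: S) := by
  rcases S with _ | ⟨s', S⟩
  · simp [place, getD_set_self' _ _ _ h, List.set_set]
  · simp [place, getD_set_self' _ _ _ h, List.set_set]

theorem main_lemma (cs : List Char) : ∀ (temp : List (List Char)) (j : Nat)
    (num : List Char) (mark : Bool), j ≤ 3 → temp.length = 5 →
    runA cs temp j num mark =
      place temp j (fmtLoop (pvSplitEq cs).headI [] num mark
        :: ((pvSplitEq cs).tail).map pvFmt) := by
  induction cs with
  | nil =>
    intro temp j num mark hj hlen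
    simp [runA, chemLoop, pvSplitEq, place, fmtLoop]
  | cons c rest ih =>
    intro temp j num mark hj hlen
    have hjl : j < temp.length := by omega
    by_cases hd : PySem.Chars.isdigit c = true
    · -- digit: buffer grows, same segment continues
      have hne : ¬ (c = '=') := by
        intro h; subst h; exact absurd hd (by decide)
      obtain ⟨p, ps, hps⟩ := List.exists_cons_of_ne_nil (pvSplitEq_ne_nil rest)
      have hsplit : pvSplitEq (c :: rest) = (c :: p) :: ps := by
        simp [pvSplitEq, hne, hps]
      rw [hsplit]
      simp only [List.headI, List.tail]
      have h1 : fmtLoop (c :: p) [] num mark = fmtLoop p [] (num ++ [c]) mark := by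
        simp [fmtLoop, hd]
      have h2 : runA (c :: rest) temp j num mark = runA rest temp j (num ++ [c]) mark := by
        simp [runA, chemLoop, hd]
      rw [h1, h2, ih temp j (num ++ [c]) mark hj hlen, hps]
      simp only [List.headI, List.tail]
    · by_cases he : c = '='
      · -- '=': flush, advance to next slot (or break)
        subst he
        have hsplit : pvSplitEq ('=' :: rest) = [] :: pvSplitEq rest := by
          simp [pvSplitEq]
        rw [hsplit]
        simp only [List.headI, List.tail]
        have hmark1 : (PySem.Chars.isalpha '=' || '=' = ')' || '=' = ']') = false := by decide
        obtain ⟨p, ps, hps⟩ := List.exists_cons_of_ne_nil (pvSplitEq_ne_nil rest)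
        have hfl : fmtLoop [] [] num mark = pvFlush mark num := by
          simp [fmtLoop]
        rw [hfl, hps]
        by_cases hb : j + 1 > 3
        · -- break
          have hA : runA ('=' :: rest) temp j num mark =
              ((temp.set j (temp.getD j [] ++ pvFlush mark num)).set (j + 1)
                (((temp.set j (temp.getD j [] ++ pvFlush mark num)).getD (j + 1) [])), j + 1) := by
            simp [runA, chemLoop, hd, hb, pvFlush]
          rw [hA]
          simp [place, hb, List.getD]
        · have hA : runA ('=' :: rest) temp j num mark =
              runA rest (temp.set j (temp.getD j [] ++ pvFlush mark num)) (j + 1) [] false := by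
            simp only [runA, chemLoop, hd, hmark1]
            simp [hb]
          rw [hA, ih _ (j + 1) [] false (by omega) (by simp [hlen]), hps]
          simp only [List.headI, List.tail, List.map]
          simp [place, hb, pvFmt, List.getD]
      · -- ordinary character: flush, emit c, stay in slot j
        obtain ⟨p, ps, hps⟩ := List.exists_cons_of_ne_nil (pvSplitEq_ne_nil rest)
        have hsplit : pvSplitEq (c :: rest) = (c :: p) :: ps := by
          simp [pvSplitEq, he, hps]
        rw [hsplit]
        simp only [List.headI, List.tail]
        have hfmt : fmtLoop (c :: p) [] num mark =
            (pvFlush mark num ++ [c]) ++ fmtLoop p [] [] (PySem.Chars.isalpha c || c = ')' || c = ']') := by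
          simp only [fmtLoop, hd]
          rw [fmtLoop_out p ([] ++ pvFlush mark num ++ [c])]
          simp
        rw [hfmt]
        have hA : runA (c :: rest) temp j num mark =
            runA rest (temp.set j (temp.getD j [] ++ (pvFlush mark num ++ [c]))) j []
              (PySem.Chars.isalpha c || c = ')' || c = ']') := by
          simp [runA, chemLoop, hd, he, List.set_set, getD_set_self' _ _ _ hjl,
            List.append_assoc, List.getD]
        rw [hA, ih _ j [] _ hj (by simp [hlen]), hps]
        simp only [List.headI, List.tail]
        rw [← place_absorb _ _ _ _ _ hjl]

theorem chem_eq_alt (inp : String) : chem inp = chem_alt inp := by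
  obtain ⟨p, ps, hps⟩ := List.exists_cons_of_ne_nil (pvSplitEq_ne_nil inp.toList)
  have hmain := main_lemma inp.toList (List.replicate 5 []) 0 [] false (by omega) (by simp)
  rw [hps] at hmain
  simp only [List.headI, List.tail] at hmain
  have hchem : chem inp =
      (fun r : List (List Char) × Nat =>
        if r.2 = 0 then String.mk (r.1.getD 0 [])
        else if r.2 = 1 then String.mk (r.1.getD 0 [] ++ '=' :: r.1.getD 1 [])
        else if r.2 = 2 then
          String.mk (r.1.getD 0 [] ++ "\\frac{\\underline{".toList ++ r.1.getD 1 []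
            ++ "}}{\\ }".toList ++ r.1.getD 2 [])
        else if r.2 = 3 then
          String.mk (r.1.getD 0 [] ++ "\\frac{\\underline{".toList ++ r.1.getD 1 []
            ++ "}}{".toList ++ r.1.getD 2 [] ++ "}".toList ++ r.1.getD 3 [])
        else "Error! There seems more then 3\"=\" !")
        (runA inp.toList (List.replicate 5 []) 0 [] false) := by
    simp [chem, runA]
  rw [hchem, hmain]
  have hfmtp : fmtLoop p [] [] false = pvFmt p := rfl
  rw [hfmtp]
  rcases ps with _ | ⟨b, _ | ⟨c, _ | ⟨d, _ | ⟨e, rest⟩⟩⟩⟩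
  · simp [place, chem_alt, hps, pvFmt, List.replicate]
  · simp [place, chem_alt, hps, pvFmt, List.replicate]
  · simp [place, chem_alt, hps, pvFmt, List.replicate]
  · simp [place, chem_alt, hps, pvFmt, List.replicate]
  · simp only [List.map_cons, place, List.replicate]
    simp [chem_alt, hps]

-- ===== VERDICT (by name: the statement is the Claim_ definition above) =====
theorem chem_spec : Claim_equal_chem := by
  intro inp _
  exact chem_eq_alt inp
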